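-- pv_equiv track=rewrite | github.com/macwoj/interview_prep_py | exercises/21_merge_lists.py | merge3_2
-- ===== SOURCE A (Python) =====
-- def merge3_2(listA,listB,listC):
--     result = []
--     a,b,c=0,0,0
--     while a<len(listA) or b<len(listB) or c<len(listC):
--         val_a=listA[a] if a<len(listA) else float('inf')
--         val_b=listB[b] if b<len(listB) else float('inf')
--         val_c=listC[c] if c<len(listC) else float('inf')
--         val = min(val_a,val_b,val_c)
--         if not result or result[-1]!=val:
--             result.append(val)
--         if val == val_a:
--             a+=1
--         elif val == val_b:
--             b+=1
--         else:
--             c+=1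
--
--     return result
-- ===== SOURCE B (Python) =====
-- import itertools
--
-- def _merge2(xs, ys):
--     out = []
--     i = j = 0
--     while i < len(xs) and j < len(ys):
--         if xs[i] <= ys[j]:
--             out.append(xs[i]); i += 1
--         else:
--             out.append(ys[j]); j += 1
--     out.extend(xs[i:])
--     out.extend(ys[j:])
--     return out
--
-- def merge3_2(listA, listB, listC):
--     merged = _merge2(_merge2(listA, listB), listC)
--     return [k for k, _ in itertools.groupby(merged)]
-- ===== Notes on version B (the rewrite author's own statement) =====
-- stated objective: idiomatic
-- what changed: Replaces A's single hand-written three-pointer loop with float('inf') sentinels and on-the-fly dedup by two standard pairwise merges ((A+B)+C) followed by a separate itertools.groupby pass that collapses equal runs.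
import Mathlib
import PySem

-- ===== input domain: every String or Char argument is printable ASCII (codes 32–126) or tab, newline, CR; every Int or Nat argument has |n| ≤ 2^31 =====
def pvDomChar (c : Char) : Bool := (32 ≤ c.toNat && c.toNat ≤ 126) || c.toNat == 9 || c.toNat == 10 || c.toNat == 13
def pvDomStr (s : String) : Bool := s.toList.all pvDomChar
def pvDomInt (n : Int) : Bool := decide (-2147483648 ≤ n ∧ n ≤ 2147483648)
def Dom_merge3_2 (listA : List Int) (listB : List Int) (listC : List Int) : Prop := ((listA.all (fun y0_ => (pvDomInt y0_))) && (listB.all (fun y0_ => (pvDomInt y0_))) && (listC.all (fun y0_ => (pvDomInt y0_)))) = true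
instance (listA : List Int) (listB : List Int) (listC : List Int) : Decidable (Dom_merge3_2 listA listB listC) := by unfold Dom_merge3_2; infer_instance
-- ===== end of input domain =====

-- B replaces A's single three-pointer loop (inf sentinels, dedup on the fly) by two
-- pairwise merges followed by a separate groupby-style dedup pass; more idiomatic.

-- ===== PORT A =====
-- min over "value or +inf": none plays float('inf')
def ominf (x y : Option Int) : Option Int :=
  match x, y with
  | none, y => y
  | x, none => x
  | some a, some b => some (min a b)

-- the while loop of A: state = remaining suffixes (the three indices) and result
def merge3_2_go (A B C res : List Int) : List Int :=
  match hv : ominf (ominf A.head? B.head?) C.head? with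
  | none => res          -- a<len(listA) or … all false: loop exits
  | some val =>
    -- if not result or result[-1] != val: result.append(val)
    let res' := if res.getLast? = some val then res else res ++ [val]
    if hA : A.head? = some val then merge3_2_go A.tail B C res'
    else if hB : B.head? = some val then merge3_2_go A B.tail C res'
    else merge3_2_go A B C.tail res'
termination_by A.length + B.length + C.length
decreasing_by
  · cases A with
    | nil => simp at hA
    | cons a t => simp
  · cases B with
    | nil => simp at hB
    | cons b t => simp
  · cases C with
    | nil =>
      exfalso
      cases A <;> cases B <;> simp [ominf] at hv hA hB <;> omega
    | cons c t => simp

def merge3_2 (listA : List Int) (listB : List Int) (listC : List Int) : List Int :=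
  merge3_2_go listA listB listC []

-- ===== PORT B =====
-- _merge2: standard two-way merge, left-biased on ties
def merge2 : List Int → List Int → List Int
  | [], ys => ys
  | xs, [] => xs
  | x :: xs, y :: ys =>
    if x ≤ y then x :: merge2 xs (y :: ys) else y :: merge2 (x :: xs) ys

-- [k for k, _ in itertools.groupby(merged)]: first element of each equal run
def dedupC : List Int → List Int
  | [] => []
  | x :: xs => x :: dedupC (xs.dropWhile (· = x))
termination_by xs => xs.length
decreasing_by
  have := List.length_dropWhile_le (p := (· = x)) xs
  simp; omega

def merge3_2_alt (listA : List Int) (listB : List Int) (listC : List Int) : List Int :=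
  dedupC (merge2 (merge2 listA listB) listC)

-- ===== PRECONDITION & SPEC =====
def Spec_merge3_2 (listA : List Int) (listB : List Int) (listC : List Int) (out : List Int) : Prop := out = merge3_2_alt listA listB listC
instance (listA : List Int) (listB : List Int) (listC : List Int) (out : List Int) : Decidable (Spec_merge3_2 listA listB listC out) := by unfold Spec_merge3_2; infer_instance

-- ===== CLAIM (what is proved, stated in full; the proofs are below) =====
def Claim_equal_merge3_2 : Prop := ∀ (listA : List Int) (listB : List Int) (listC : List Int), Dom_merge3_2 listA listB listC → Spec_merge3_2 listA listB listC (merge3_2 listA listB listC)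

-- ===== LEMMAS AND PROOFS =====

-- the raw (no-dedup) merge sequence produced by A's selection rule
def m3 (A B C : List Int) : List Int :=
  match hv : ominf (ominf A.head? B.head?) C.head? with
  | none => []
  | some val =>
    if hA : A.head? = some val then val :: m3 A.tail B C
    else if hB : B.head? = some val then val :: m3 A B.tail C
    else val :: m3 A B C.tail
termination_by A.length + B.length + C.length
decreasing_by
  · cases A with
    | nil => simp at hA
    | cons a t => simp
  · cases B with
    | nil => simp at hB
    | cons b t => simp
  · cases C with
    | nil =>
      exfalso
      cases A <;> cases B <;> simp [ominf] at hv hA hB <;> omega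
    | cons c t => simp

-- dedup with a seed: the "result[-1]" comparison factored out of the loop
def dedupSeed : Option Int → List Int → List Int
  | _, [] => []
  | last, x :: xs => if last = some x then dedupSeed last xs else x :: dedupSeed (some x) xs

theorem m3_eq_def (A B C : List Int) :
    m3 A B C =
      match ominf (ominf A.head? B.head?) C.head? with
      | none => []
      | some val =>
        if A.head? = some val then val :: m3 A.tail B C
        else if B.head? = some val then val :: m3 A B.tail C
        else val :: m3 A B C.tail := by
  rw [m3]
  cases hd : ominf (ominf A.head? B.head?) C.head? <;> rfl

theorem merge2_nil_right (xs : List Int) : merge2 xs [] = xs := by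
  cases xs <;> simp [merge2]

theorem merge3_2_go_eq (A B C res : List Int) :
    merge3_2_go A B C res = res ++ dedupSeed res.getLast? (m3 A B C) := by
  fun_induction merge3_2_go A B C res with
  | case1 A B C res hv => rw [m3_eq_def]; simp [hv, dedupSeed]
  | case2 A B C res val hv res' hA ih =>
    rw [m3_eq_def, hv]; simp only [hA, reduceIte]
    simp only [res'] at ih
    by_cases hL : res.getLast? = some val <;>
      simp only [hL, reduceDIte] at ih <;>
      simp [res', dedupSeed, hL, ih, List.getLast?_concat]
  | case3 A B C res val hv res' hA hB ih =>
    rw [m3_eq_def, hv]; simp only [hA, hB, reduceIte]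
    simp only [res'] at ih
    by_cases hL : res.getLast? = some val <;>
      simp only [hL, reduceDIte] at ih <;>
      simp [res', dedupSeed, hL, ih, List.getLast?_concat]
  | case4 A B C res val hv res' hA hB ih =>
    rw [m3_eq_def, hv]; simp only [hA, hB, reduceIte]
    simp only [res'] at ih
    by_cases hL : res.getLast? = some val <;>
      simp only [hL, reduceDIte] at ih <;>
      simp [res', dedupSeed, hL, ih, List.getLast?_concat]

theorem m3_eq (A B C : List Int) : m3 A B C = merge2 (merge2 A B) C := by
  fun_induction m3 A B C with
  | case1 A B C hv =>
    cases A <;> cases B <;> cases C <;> simp [ominf] at hv ⊢ <;> simp [merge2]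
  | case2 A B C val hv hA ih =>
    cases A with
    | nil => simp at hA
    | cons a A' =>
      simp at hA; subst hA
      cases B <;> cases C <;>
        simp [ominf] at hv ih ⊢ <;>
        simp_all [merge2, merge2_nil_right]
  | case3 A B C val hv hA hB ih =>
    cases B with
    | nil => simp at hB
    | cons b B' =>
      simp at hB; subst hB
      cases A with
      | nil =>
        cases C with
        | nil =>
          simp [ominf] at hv ih ⊢
          simp [ih, merge2, merge2_nil_right]
        | cons h t =>
          simp [ominf] at hv ih ⊢
          simp [ih, merge2, hv]
      | cons h1 t1 =>
        cases C with
        | nil =>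
          simp [ominf] at hv ih hA ⊢
          have h1b : ¬ h1 ≤ b := by omega
          simp [ih, merge2, h1b, merge2_nil_right]
        | cons h t =>
          simp [ominf] at hv ih hA ⊢
          have h1b : ¬ h1 ≤ b := by omega
          have bh : b ≤ h := by omega
          simp [ih, merge2, h1b, bh]
  | case4 A B C val hv hA hB ih =>
    cases C with
    | nil =>
      exfalso; cases A <;> cases B <;> simp [ominf] at hv hA hB <;> omega
    | cons c C' =>
      cases A with
      | nil =>
        cases B with
        | nil =>
          simp [ominf] at hv ih ⊢
          subst hv
          simp [ih, merge2]
        | cons h t =>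
          simp [ominf] at hv ih hB ⊢
          have hc : c = val := by omega
          have hh : ¬ h ≤ c := by omega
          subst hc
          simp [ih, merge2, hh]
      | cons h1 t1 =>
        cases B with
        | nil =>
          simp [ominf] at hv ih hA ⊢
          have hc : c = val := by omega
          have hh : ¬ h1 ≤ c := by omega
          subst hc
          simp [ih, merge2, merge2_nil_right, hh]
        | cons h2 t2 =>
          simp [ominf] at hv ih hA hB ⊢
          have hc : c = val := by omega
          have n1 : ¬ h1 ≤ c := by omega
          have n2 : ¬ h2 ≤ c := by omega
          subst hc
          by_cases h12 : h1 ≤ h2 <;> simp [merge2, h12, n1, n2, ih]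

theorem dedupSeed_some (xs : List Int) (v : Int) :
    dedupSeed (some v) xs = dedupC (xs.dropWhile (· = v)) := by
  induction xs generalizing v with
  | nil => simp [dedupSeed, dedupC]
  | cons x xs ih =>
    by_cases h : x = v
    · subst h; simp [dedupSeed, List.dropWhile_cons, ih]
    · simp [dedupSeed, List.dropWhile_cons, h, Ne.symm h, dedupC, ih]

theorem dedupSeed_none (xs : List Int) : dedupSeed none xs = dedupC xs := by
  cases xs with
  | nil => simp [dedupSeed, dedupC]
  | cons x xs => simp [dedupSeed, dedupSeed_some, dedupC]

-- ===== VERDICT (by name: the statement is the Claim_ definition above) =====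
theorem merge3_2_spec : Claim_equal_merge3_2 := by
  intro A B C _
  unfold Spec_merge3_2 merge3_2 merge3_2_alt
  rw [merge3_2_go_eq, m3_eq]
  simp [dedupSeed_none]
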